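-- pv_equiv track=rewrite | github.com/Harshahg20/AlertMind-AI | alertmind-ai-backend/app/services/alert_correlation.py | _are_related_systems
-- ===== SOURCE A (Python) =====
-- def _are_related_systems(system1: str, system2: str) -> bool:
--     """Check if two systems are typically related"""
--     related_groups = [
--         ["database", "web-app", "api-gateway"],
--         ["email-server", "file-server", "backup-system"],
--         ["network-gateway", "firewall", "load-balancer"],
--         ["storage-server", "backup-system", "file-server"]
--     ]
--
--     for group in related_groups:
--         if system1 in group and system2 in group:
--             return True
--
--     return False
-- ===== SOURCE B (Python) =====
-- # B: pre-built index system -> set of group ids, answered by one lookup per system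
-- # plus a disjointness test, instead of scanning every group for joint membership.
-- _RELATED_GROUPS = [
--     ["database", "web-app", "api-gateway"],
--     ["email-server", "file-server", "backup-system"],
--     ["network-gateway", "firewall", "load-balancer"],
--     ["storage-server", "backup-system", "file-server"]
-- ]
--
-- _GROUP_INDEX = {}
-- for _i, _group in enumerate(_RELATED_GROUPS):
--     for _name in _group:
--         _GROUP_INDEX.setdefault(_name, set()).add(_i)
--
--
-- def _are_related_systems(system1: str, system2: str) -> bool:
--     groups1 = _GROUP_INDEX.get(system1, set())
--     groups2 = _GROUP_INDEX.get(system2, set())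
--     return not groups1.isdisjoint(groups2)
-- ===== Notes on version B (the rewrite author's own statement) =====
-- stated objective: idiomatic
-- what changed: Replaces the per-call scan over all groups testing joint membership with a module-level inverted index (system -> set of group ids) built once, so the check becomes two dict lookups and a set-disjointness test.
import Mathlib
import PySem

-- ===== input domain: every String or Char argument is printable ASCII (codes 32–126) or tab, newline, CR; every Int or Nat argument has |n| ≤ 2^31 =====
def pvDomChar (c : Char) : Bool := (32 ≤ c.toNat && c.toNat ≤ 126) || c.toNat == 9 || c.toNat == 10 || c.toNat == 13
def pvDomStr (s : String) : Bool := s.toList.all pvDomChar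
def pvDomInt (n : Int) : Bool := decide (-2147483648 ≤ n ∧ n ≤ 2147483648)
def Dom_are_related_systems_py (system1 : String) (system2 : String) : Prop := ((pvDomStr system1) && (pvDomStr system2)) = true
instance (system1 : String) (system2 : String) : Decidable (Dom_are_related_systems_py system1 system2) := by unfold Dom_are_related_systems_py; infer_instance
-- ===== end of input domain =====

-- B builds an inverted index (system -> set of group ids) once and answers with two
-- lookups and a disjointness test instead of A's per-call scan over all groups.

-- ===== PORT A =====
-- the literal related_groups list from A
def pvRelatedGroupsA : List (List String) :=
  [["database", "web-app", "api-gateway"],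
   ["email-server", "file-server", "backup-system"],
   ["network-gateway", "firewall", "load-balancer"],
   ["storage-server", "backup-system", "file-server"]]

-- A's 'for group in related_groups: if system1 in group and system2 in group: return True'
def pvALoop (system1 system2 : String) : List (List String) → Bool
  | [] => false
  | g :: rest =>
      if g.contains system1 && g.contains system2 then true
      else pvALoop system1 system2 rest

def are_related_systems_py (system1 : String) (system2 : String) : Bool :=
  pvALoop system1 system2 pvRelatedGroupsA

-- ===== PORT B =====
def pvRelatedGroupsB : List (List String) :=
  [["database", "web-app", "api-gateway"],
   ["email-server", "file-server", "backup-system"],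
   ["network-gateway", "firewall", "load-balancer"],
   ["storage-server", "backup-system", "file-server"]]

-- _GROUP_INDEX: for i, group in enumerate(groups): for name in group: setdefault(name,set()).add(i)
def pvGroupIndex : PySem.Dict String (PySem.Set Int) :=
  (PySem.List.enumerate pvRelatedGroupsB).foldl
    (fun d p =>
      p.2.foldl (fun d name =>
        d.modify name PySem.Set.empty (fun s => PySem.Set.add s p.1)) d)
    PySem.Dict.empty

def are_related_systems_py_alt (system1 : String) (system2 : String) : Bool :=
  let groups1 := (pvGroupIndex.get? system1).getD PySem.Set.empty
  let groups2 := (pvGroupIndex.get? system2).getD PySem.Set.empty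
  !(PySem.Set.isdisjoint groups1 groups2)

-- ===== PRECONDITION & SPEC =====
def Spec_are_related_systems_py (system1 : String) (system2 : String) (out : Bool) : Prop := out = are_related_systems_py_alt system1 system2
instance (system1 : String) (system2 : String) (out : Bool) : Decidable (Spec_are_related_systems_py system1 system2 out) := by unfold Spec_are_related_systems_py; infer_instance

-- ===== CLAIM (what is proved, stated in full; the proofs are below) =====
def Claim_equal_are_related_systems_py : Prop := ∀ (system1 : String) (system2 : String), Dom_are_related_systems_py system1 system2 → Spec_are_related_systems_py system1 system2 (are_related_systems_py system1 system2)

-- ===== LEMMAS AND PROOFS =====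

-- every system name occurring in the groups, or none of them
lemma pv_key_cases (s : String) :
    s = "database" ∨ s = "web-app" ∨ s = "api-gateway" ∨ s = "email-server" ∨
    s = "file-server" ∨ s = "backup-system" ∨ s = "network-gateway" ∨ s = "firewall" ∨
    s = "load-balancer" ∨ s = "storage-server" ∨
    (s ≠ "database" ∧ s ≠ "web-app" ∧ s ≠ "api-gateway" ∧ s ≠ "email-server" ∧
     s ≠ "file-server" ∧ s ≠ "backup-system" ∧ s ≠ "network-gateway" ∧ s ≠ "firewall" ∧
     s ≠ "load-balancer" ∧ s ≠ "storage-server") := by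
  tauto

-- the built index, evaluated
lemma pvGroupIndex_eq : pvGroupIndex = PySem.Dict.mk
    [("database", [0]), ("web-app", [0]), ("api-gateway", [0]),
     ("email-server", [1]), ("file-server", [1, 3]), ("backup-system", [1, 3]),
     ("network-gateway", [2]), ("firewall", [2]), ("load-balancer", [2]),
     ("storage-server", [3])] := by decide

def PvOther (s : String) : Prop :=
  s ≠ "database" ∧ s ≠ "web-app" ∧ s ≠ "api-gateway" ∧ s ≠ "email-server" ∧
  s ≠ "file-server" ∧ s ≠ "backup-system" ∧ s ≠ "network-gateway" ∧ s ≠ "firewall" ∧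
  s ≠ "load-balancer" ∧ s ≠ "storage-server"

lemma pv_beq_false {a b : String} (h : a ≠ b) : (a == b) = false :=
  beq_eq_false_iff_ne.mpr h

lemma pv_lookup_none (s : String) (h : PvOther s) : pvGroupIndex.get? s = none := by
  obtain ⟨n1, n2, n3, n4, n5, n6, n7, n8, n9, n10⟩ := h
  rw [pvGroupIndex_eq]
  simp [PySem.Dict.get?_mk_cons, pv_beq_false (Ne.symm n1), pv_beq_false (Ne.symm n2),
    pv_beq_false (Ne.symm n3), pv_beq_false (Ne.symm n4), pv_beq_false (Ne.symm n5),
    pv_beq_false (Ne.symm n6), pv_beq_false (Ne.symm n7), pv_beq_false (Ne.symm n8),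
    pv_beq_false (Ne.symm n9), pv_beq_false (Ne.symm n10)]
  rfl

lemma pv_A_false_left (s1 s2 : String) (h : PvOther s1) :
    are_related_systems_py s1 s2 = false := by
  obtain ⟨n1, n2, n3, n4, n5, n6, n7, n8, n9, n10⟩ := h
  simp [are_related_systems_py, pvALoop, pvRelatedGroupsA]
  tauto

lemma pv_A_false_right (s1 s2 : String) (h : PvOther s2) :
    are_related_systems_py s1 s2 = false := by
  obtain ⟨n1, n2, n3, n4, n5, n6, n7, n8, n9, n10⟩ := h
  simp [are_related_systems_py, pvALoop, pvRelatedGroupsA]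
  tauto

lemma pv_alt_false_left (s1 s2 : String) (h : PvOther s1) :
    are_related_systems_py_alt s1 s2 = false := by
  unfold are_related_systems_py_alt
  rw [pv_lookup_none s1 h]
  simp [PySem.Set.isdisjoint, PySem.Set.empty]

lemma pv_alt_false_right (s1 s2 : String) (h : PvOther s2) :
    are_related_systems_py_alt s1 s2 = false := by
  unfold are_related_systems_py_alt
  rw [pv_lookup_none s2 h]
  simp [PySem.Set.isdisjoint, PySem.Set.empty]

-- ===== VERDICT (by name: the statement is the Claim_ definition above) =====
theorem are_related_systems_py_spec : Claim_equal_are_related_systems_py := by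
  intro s1 s2 _
  unfold Spec_are_related_systems_py
  rcases pv_key_cases s1 with h1|h1|h1|h1|h1|h1|h1|h1|h1|h1|h1 <;>
    first
      | rw [pv_A_false_left s1 s2 h1, pv_alt_false_left s1 s2 h1]
      | (subst h1
         rcases pv_key_cases s2 with h2|h2|h2|h2|h2|h2|h2|h2|h2|h2|h2 <;>
           first
             | rw [pv_A_false_right _ s2 h2, pv_alt_false_right _ s2 h2]
             | (subst h2; decide))
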